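-- pv_equiv track=rewrite | github.com/Xavier0301/pdc_project | rendu/script.py | genCodebook
-- ===== SOURCE A (Python) =====
-- def genCodebook(initial=[[1]], k=5):
--     """
--     Function to generate a orthogonal code codebook as in exercise 2 of the graded homework 2.
--
--     Parameters:
--         initial: the initialization state, [[1]] by default
--         k: parameter defining the dimensionality of the codes which is 2^k
--
--     Returns:
--         the codebook as an array
--     """
--
--     def inverseSign(word):
--         return [-i for i in word]
--
--     if k == 0:
--         return initial
--     else:
--         new = [word + inverseSign(word) for word in initial] + [word + word for word in initial]
--         return genCodebook(new, k-1)
-- ===== SOURCE B (Python) =====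
-- def genCodebook(initial=[[1]], k=5):
--     # Closed form: after k doubling steps the codebook is the Kronecker product
--     # B^(x)k (x) initial with B = [[1,-1],[1,1]]; the sign of block (i, c) is
--     # (-1)^popcount(((n-1) ^ i) & c), so each output cell is computed directly.
--     if k == 0:
--         return initial
--     if not initial:
--         return []
--     n = 1 << k
--     out = []
--     for i in range(n):
--         mask = (n - 1) ^ i
--         for word in initial:
--             row = []
--             for c in range(n):
--                 if bin(mask & c).count("1") % 2 == 1:
--                     row.extend(-x for x in word)
--                 else:
--                     row.extend(word)
--             out.append(row)
--     return out
-- ===== Notes on version B (the rewrite author's own statement) =====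
-- stated objective: alternative
-- what changed: Replaced the tail recursion that rebuilds the whole codebook k times with a direct closed-form construction: each output row/cell is generated from the Kronecker sign (-1)^popcount(((n-1)^i)&c) with n = 2^k, no intermediate codebooks.
import Mathlib
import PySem

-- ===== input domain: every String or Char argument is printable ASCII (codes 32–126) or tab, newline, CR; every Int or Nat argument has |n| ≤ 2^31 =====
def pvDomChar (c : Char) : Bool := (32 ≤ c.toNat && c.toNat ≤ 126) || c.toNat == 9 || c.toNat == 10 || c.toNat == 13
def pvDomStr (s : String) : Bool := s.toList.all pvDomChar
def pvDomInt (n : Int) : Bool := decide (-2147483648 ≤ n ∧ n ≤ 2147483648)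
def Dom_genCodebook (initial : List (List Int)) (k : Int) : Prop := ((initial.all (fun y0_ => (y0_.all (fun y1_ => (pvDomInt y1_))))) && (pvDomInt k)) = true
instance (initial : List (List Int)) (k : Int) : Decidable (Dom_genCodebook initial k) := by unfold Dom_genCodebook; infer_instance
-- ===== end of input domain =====

-- ===== PORT A =====
-- A's recursion on k; the k < 0 guard only makes the recursion total (Python A
-- raises RecursionError there, excluded by Pre_genCodebook).
def genCodebook (initial : List (List Int)) (k : Int) : List (List Int) :=
  if k = 0 then initial
  else if k < 0 then []
  else
    genCodebook
      ((initial.map (fun word => word ++ word.map (fun i => -i))) ++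
        (initial.map (fun word => word ++ word))) (k - 1)
termination_by k.toNat
decreasing_by omega

-- ===== PORT B =====
-- bin(x).count("1") of Source B
def popcount (n : Nat) : Nat :=
  if n = 0 then 0 else n % 2 + popcount (n / 2)
termination_by n
decreasing_by exact Nat.div_lt_self (by omega) (by omega)

-- the inner `for c in range(n)` loop of Source B building one row
def rowB (mask n : Nat) (word : List Int) : List Int :=
  (List.range n).flatMap (fun c =>
    if popcount (mask &&& c) % 2 = 1 then word.map (fun x => -x) else word)

-- closed-form construction of Source B (the i/word loops become flatMap/map)
def genCodebook_alt (initial : List (List Int)) (k : Int) : List (List Int) :=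
  if k = 0 then initial
  else if initial = [] then []
  else
    let n : Nat := 2 ^ k.toNat
    (List.range n).flatMap (fun i => initial.map (fun word => rowB ((n - 1) ^^^ i) n word))

-- ===== PRECONDITION & SPEC =====
-- Pre_ excludes exactly k < 0, where Python A raises RecursionError (and B raises ValueError).
def Pre_genCodebook (initial : List (List Int)) (k : Int) : Prop := 0 ≤ k
instance (initial : List (List Int)) (k : Int) : Decidable (Pre_genCodebook initial k) := by unfold Pre_genCodebook; infer_instance
def pvWitness_genCodebook : List (List Int) × Int := ([[1]], 3)
def Spec_genCodebook (initial : List (List Int)) (k : Int) (out : List (List Int)) : Prop := out = genCodebook_alt initial k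
instance (initial : List (List Int)) (k : Int) (out : List (List Int)) : Decidable (Spec_genCodebook initial k out) := by unfold Spec_genCodebook; infer_instance

-- ===== CLAIM (what is proved, stated in full; the proofs are below) =====
def Claim_equal_genCodebook : Prop := ∀ (initial : List (List Int)) (k : Int), Dom_genCodebook initial k → Pre_genCodebook initial k → Spec_genCodebook initial k (genCodebook initial k)

-- ===== LEMMAS AND PROOFS =====

-- A's one doubling step
def stepA (M : List (List Int)) : List (List Int) :=
  (M.map (fun word => word ++ word.map (fun i => -i))) ++ (M.map (fun word => word ++ word))

-- A's recursion, on a Nat counter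
def aIter (M : List (List Int)) : Nat → List (List Int)
  | 0 => M
  | j + 1 => aIter (stepA M) j

-- B's closed form, on a Nat counter
def gForm (j : Nat) (M : List (List Int)) : List (List Int) :=
  (List.range (2 ^ j)).flatMap (fun i =>
    M.map (fun word => rowB ((2 ^ j - 1) ^^^ i) (2 ^ j) word))

theorem genCodebook_eq_aIter (j : Nat) : ∀ M : List (List Int), genCodebook M (j : Int) = aIter M j := by
  induction j with
  | zero => intro M; simp [genCodebook, aIter]
  | succ j ih =>
    intro M
    rw [genCodebook]
    simp only [Nat.cast_succ, show ((j : Int) + 1 ≠ 0) by omega, if_false,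
      show ¬((j : Int) + 1 < 0) by omega, if_false, add_sub_cancel_right]
    exact ih (stepA M)

theorem popcount_zero : popcount 0 = 0 := by
  rw [popcount]; simp

theorem gForm_zero (M : List (List Int)) : gForm 0 M = M := by
  simp [gForm, rowB, popcount_zero]

theorem genCodebook_alt_eq_gForm (j : Nat) (M : List (List Int)) (hM : M ≠ []) :
    genCodebook_alt M (j : Int) = gForm j M := by
  cases j with
  | zero =>
    rw [genCodebook_alt, if_pos (by norm_num), gForm_zero]
  | succ j =>
    simp only [genCodebook_alt, if_neg (show ¬(((j + 1 : Nat) : Int) = 0) by omega),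
      if_neg hM, Int.toNat_natCast]
    rfl

theorem aIter_nil (j : Nat) : aIter [] j = [] := by
  induction j with
  | zero => rfl
  | succ j ih => simpa [aIter, stepA] using ih

theorem pvRangeTwoMul (n : Nat) :
    List.range (2 * n) = (List.range n).flatMap (fun i => [2 * i, 2 * i + 1]) := by
  induction n with
  | zero => simp
  | succ n ih =>
    rw [show 2 * (n + 1) = (2 * n + 1) + 1 by omega, List.range_succ, List.range_succ,
      List.range_succ, List.flatMap_append, ← ih]
    simp

theorem tb_zero (a c : Nat) (hc : c < 2) : (2 * a + c).testBit 0 = decide (c = 1) := by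
  rw [Nat.testBit_zero, decide_eq_decide]
  omega

theorem tb_succ (a c i : Nat) (hc : c < 2) : (2 * a + c).testBit (i + 1) = a.testBit i := by
  rw [Nat.testBit_add_one]
  congr 1
  omega

theorem and_bits (x y e b : Nat) (he : e < 2) (hb : b < 2) :
    (2 * x + e) &&& (2 * y + b) = 2 * (x &&& y) + (e &&& b) := by
  have h2 : e &&& b < 2 := by interval_cases e <;> interval_cases b <;> decide
  apply Nat.eq_of_testBit_eq
  intro i
  cases i with
  | zero =>
    rw [Nat.testBit_and, tb_zero x e he, tb_zero y b hb, tb_zero _ _ h2]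
    interval_cases e <;> interval_cases b <;> decide
  | succ i =>
    rw [Nat.testBit_and, tb_succ x e i he, tb_succ y b i hb, tb_succ _ _ i h2, Nat.testBit_and]

theorem xor_bits (x y e b : Nat) (he : e < 2) (hb : b < 2) :
    (2 * x + e) ^^^ (2 * y + b) = 2 * (x ^^^ y) + (e ^^^ b) := by
  have h2 : e ^^^ b < 2 := by interval_cases e <;> interval_cases b <;> decide
  apply Nat.eq_of_testBit_eq
  intro i
  cases i with
  | zero =>
    rw [Nat.testBit_xor, tb_zero x e he, tb_zero y b hb, tb_zero _ _ h2]
    interval_cases e <;> interval_cases b <;> decide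
  | succ i =>
    rw [Nat.testBit_xor, tb_succ x e i he, tb_succ y b i hb, tb_succ _ _ i h2, Nat.testBit_xor]

theorem popcount_bit (x e : Nat) (he : e < 2) : popcount (2 * x + e) = popcount x + e := by
  rw [popcount]
  by_cases h : 2 * x + e = 0
  · have hx : x = 0 := by omega
    have he0 : e = 0 := by omega
    simp [hx, he0, popcount]
  · simp only [h, if_false]
    rw [show (2 * x + e) % 2 = e by omega, show (2 * x + e) / 2 = x by omega]
    omega

theorem popcount_even (x : Nat) : popcount (2 * x) = popcount x := by
  simpa using popcount_bit x 0 (by omega)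

theorem popcount_odd (x : Nat) : popcount (2 * x + 1) = popcount x + 1 := by
  simpa using popcount_bit x 1 (by omega)

-- one row of the (j+1)-level closed form, split on the parity of the row index
theorem rowB_even (n i : Nat) (hn : 1 ≤ n) (w : List Int) :
    rowB ((2 * n - 1) ^^^ (2 * i)) (2 * n) w
      = rowB ((n - 1) ^^^ i) n (w ++ w.map (fun x => -x)) := by
  unfold rowB
  rw [pvRangeTwoMul n, List.flatMap_assoc]
  congr 1
  funext c
  have hx : (2 * n - 1) ^^^ (2 * i) = 2 * ((n - 1) ^^^ i) + 1 := by
    rw [show 2 * n - 1 = 2 * (n - 1) + 1 by omega, show 2 * i = 2 * i + 0 by omega,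
      xor_bits _ _ 1 0 (by omega) (by omega)]
    simp
  have h0 : (2 * ((n - 1) ^^^ i) + 1) &&& (2 * c) = 2 * (((n - 1) ^^^ i) &&& c) := by
    simpa using and_bits ((n - 1) ^^^ i) c 1 0 (by omega) (by omega)
  have h1 : (2 * ((n - 1) ^^^ i) + 1) &&& (2 * c + 1) = 2 * (((n - 1) ^^^ i) &&& c) + 1 := by
    simpa using and_bits ((n - 1) ^^^ i) c 1 1 (by omega) (by omega)
  simp only [List.flatMap_cons, List.flatMap_nil, List.append_nil, hx, h0, h1,
    popcount_even, popcount_odd]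
  by_cases hp : popcount (((n - 1) ^^^ i) &&& c) % 2 = 1
  · simp [hp, show (popcount (((n - 1) ^^^ i) &&& c) + 1) % 2 ≠ 1 by omega, List.map_append]
  · simp [hp, show (popcount (((n - 1) ^^^ i) &&& c) + 1) % 2 = 1 by omega]

theorem rowB_odd (n i : Nat) (hn : 1 ≤ n) (w : List Int) :
    rowB ((2 * n - 1) ^^^ (2 * i + 1)) (2 * n) w
      = rowB ((n - 1) ^^^ i) n (w ++ w) := by
  unfold rowB
  rw [pvRangeTwoMul n, List.flatMap_assoc]
  congr 1
  funext c
  have hx : (2 * n - 1) ^^^ (2 * i + 1) = 2 * ((n - 1) ^^^ i) := by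
    rw [show 2 * n - 1 = 2 * (n - 1) + 1 by omega,
      xor_bits _ _ 1 1 (by omega) (by omega)]
    simp
  have h0 : (2 * ((n - 1) ^^^ i)) &&& (2 * c) = 2 * (((n - 1) ^^^ i) &&& c) := by
    simpa using and_bits ((n - 1) ^^^ i) c 0 0 (by omega) (by omega)
  have h1 : (2 * ((n - 1) ^^^ i)) &&& (2 * c + 1) = 2 * (((n - 1) ^^^ i) &&& c) := by
    simpa using and_bits ((n - 1) ^^^ i) c 0 1 (by omega) (by omega)
  simp only [List.flatMap_cons, List.flatMap_nil, List.append_nil, hx, h0, h1, popcount_even]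
  by_cases hp : popcount (((n - 1) ^^^ i) &&& c) % 2 = 1
  · simp [hp, List.map_append]
  · simp [hp]

-- the key step: the closed form at j+1 equals the closed form at j applied to stepA M
theorem gForm_succ (j : Nat) (M : List (List Int)) : gForm (j + 1) M = gForm j (stepA M) := by
  unfold gForm stepA
  have hn : 1 ≤ 2 ^ j := Nat.one_le_two_pow
  rw [show 2 ^ (j + 1) = 2 * 2 ^ j by ring, pvRangeTwoMul (2 ^ j), List.flatMap_assoc]
  congr 1
  funext i
  simp only [List.flatMap_cons, List.flatMap_nil, List.append_nil, List.map_append, List.map_map]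
  congr 1
  · congr 1
    funext w
    exact rowB_even (2 ^ j) i hn w
  · congr 1
    funext w
    exact rowB_odd (2 ^ j) i hn w

theorem aIter_eq_gForm (j : Nat) : ∀ M, aIter M j = gForm j M := by
  induction j with
  | zero =>
    intro M
    rw [gForm_zero]
    rfl
  | succ j ih =>
    intro M
    rw [gForm_succ]
    exact ih (stepA M)

-- ===== VERDICT (by name: the statement is the Claim_ definition above) =====
theorem genCodebook_spec : Claim_equal_genCodebook := by
  intro initial k _ hpre
  unfold Spec_genCodebook
  have hk : k = (k.toNat : Int) := by
    unfold Pre_genCodebook at hpre; omega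
  by_cases hM : initial = []
  · subst hM
    rw [hk, genCodebook_eq_aIter, aIter_nil, genCodebook_alt]
    split <;> simp
  · rw [hk, genCodebook_eq_aIter, genCodebook_alt_eq_gForm _ _ hM, aIter_eq_gForm]
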